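-- pv_equiv track=rewrite | github.com/cmfranca34-alt/camila_franca_exerciciostpsi0226 | EXERCICIOS/Ex3 Exercicio Ordenação de Nomes.py | comparar_nomes_completos
-- ===== SOURCE A (Python) =====
-- def comparar_strings(s1, s2):
--     #Compara duas strings caractere a caractere usando ord()
--     tamanho_minimo = min(len(s1), len(s2))
--
--     for i in range(tamanho_minimo):
--         if ord(s1[i]) < ord(s2[i]):
--             return -1   # s1 vem antes
--         elif ord(s1[i]) > ord(s2[i]):
--             return 1    # s2 vem antes
--
--     #Uma é prefixo da outra → a mais curta vem primeiro
--     if len(s1) < len(s2):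
--         return -1
--     elif len(s1) > len(s2):
--         return 1
--     return 0  # iguais
--
-- def comparar_nomes_completos(nome1, nome2):
--     #Separar primeiro nome e apelido
--     #Assumimos formato "Primeiro Apelido"
--     partes1 = []
--     partes2 = []
--
--     palavra = ""
--     for c in nome1 + " ":
--         if c == " ":
--             if len(palavra) > 0:
--                 partes1.append(palavra)
--             palavra = ""
--         else:
--             palavra += c
--
--     palavra = ""
--     for c in nome2 + " ":
--         if c == " ":
--             if len(palavra) > 0:
--                 partes2.append(palavra)
--             palavra = ""
--         else:
--             palavra += c
--
--     if len(partes1) > 0: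
--         primeiro1 = partes1[0]
--     else:
--         primeiro1 = ""
--
--     if len(partes1) > 1:
--         apelido1 = partes1[1]
--     else:
--         apelido1 = ""
--
--     if len(partes2) > 0:
--         primeiro2 = partes2[0]
--     else:
--         primeiro2 = ""
--
--     if len(partes2) > 1:
--         apelido2 = partes2[1]
--     else:
--         apelido2 = ""
--
--     #1º critério: comparar pelo primeiro nome
--     resultado_primeiro = comparar_strings(primeiro1, primeiro2)
--
--     if resultado_primeiro != 0:
--         return resultado_primeiro
--
--     #2º critério (desempate): comparar pelo apelido
--     return comparar_strings(apelido1, apelido2)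
-- ===== SOURCE B (Python) =====
-- def chave(nome):
--     partes = [p for p in nome.split(' ') if p]
--     primeiro = partes[0] if partes else ''
--     apelido = partes[1] if len(partes) > 1 else ''
--     return (primeiro, apelido)
--
-- def comparar_nomes_completos(nome1, nome2):
--     k1 = chave(nome1)
--     k2 = chave(nome2)
--     return (k1 > k2) - (k1 < k2)
-- ===== Notes on version B (the rewrite author's own statement) =====
-- stated objective: simpler
-- what changed: Replaces A's two manual character-accumulating word-parse loops and the hand-written ord()-based char-by-char string comparator by a chave() helper using split(' ') with a filter and Python's native lexicographic tuple/string comparison, returning the sign as (k1 > k2) - (k1 < k2). (same O(n) but C-level built-ins replace per-character Python loops)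
import Mathlib
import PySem

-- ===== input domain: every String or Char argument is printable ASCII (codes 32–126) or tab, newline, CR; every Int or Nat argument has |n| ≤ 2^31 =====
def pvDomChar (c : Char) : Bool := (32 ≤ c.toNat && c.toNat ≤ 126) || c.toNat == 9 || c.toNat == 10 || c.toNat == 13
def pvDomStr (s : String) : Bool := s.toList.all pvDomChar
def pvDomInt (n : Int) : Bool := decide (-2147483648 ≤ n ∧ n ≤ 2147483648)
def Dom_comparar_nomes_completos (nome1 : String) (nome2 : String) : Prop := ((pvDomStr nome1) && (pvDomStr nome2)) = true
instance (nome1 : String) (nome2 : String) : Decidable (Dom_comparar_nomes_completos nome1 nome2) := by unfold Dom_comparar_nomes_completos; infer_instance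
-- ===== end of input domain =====

-- B replaces A's two manual word-parsing loops and char-by-char ord() comparison by split(' ')+filter
-- and native lexicographic tuple comparison (objective: simpler). Return-value equivalence only; neither mutates.

-- ===== PORT A =====
-- the body of A's word-splitting loop: for c in nome + " ": if c == " ": push palavra if nonempty; else palavra += c
def pvParseStep (st : List (List Char) × List Char) (c : Char) : List (List Char) × List Char :=
  if c = ' ' then (if st.2.length > 0 then st.1 ++ [st.2] else st.1, []) else (st.1, st.2 ++ [c])

def pvParse (cs : List Char) : List (List Char) :=
  ((cs ++ [' ']).foldl pvParseStep ([], [])).1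

-- comparar_strings: index loop over the common prefix comparing ord(), then compare lengths
def pvCmp : List Char → List Char → Int
  | a :: s1, b :: s2 =>
    if a.toNat < b.toNat then -1
    else if a.toNat > b.toNat then 1
    else pvCmp s1 s2
  | [], [] => 0
  | [], _ :: _ => -1
  | _ :: _, [] => 1

def comparar_nomes_completos (nome1 : String) (nome2 : String) : Int :=
  let partes1 := pvParse nome1.toList
  let partes2 := pvParse nome2.toList
  let primeiro1 := partes1.getD 0 []
  let apelido1 := partes1.getD 1 []
  let primeiro2 := partes2.getD 0 []
  let apelido2 := partes2.getD 1 []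
  let resultado_primeiro := pvCmp primeiro1 primeiro2
  if resultado_primeiro ≠ 0 then resultado_primeiro
  else pvCmp apelido1 apelido2

-- ===== PORT B =====
-- Python's (str, str) tuple < : first components by code-point lex order; Lean's < on List Char is exactly that
def pvTupLt (x y : List Char × List Char) : Bool :=
  decide (x.1 < y.1 ∨ (x.1 = y.1 ∧ x.2 < y.2))

-- chave(nome): partes = [p for p in nome.split(' ') if p]; (partes[0] or '', partes[1] or '')
def pvChave (cs : List Char) : List Char × List Char :=
  let partes := (PySem.Chars.splitOn cs [' ']).filter (fun p => !p.isEmpty)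
  (partes.getD 0 [], partes.getD 1 [])

def comparar_nomes_completos_alt (nome1 : String) (nome2 : String) : Int :=
  let k1 := pvChave nome1.toList
  let k2 := pvChave nome2.toList
  (if pvTupLt k2 k1 then (1 : Int) else 0) - (if pvTupLt k1 k2 then (1 : Int) else 0)

-- ===== PRECONDITION & SPEC =====
def Spec_comparar_nomes_completos (nome1 : String) (nome2 : String) (out : Int) : Prop := out = comparar_nomes_completos_alt nome1 nome2
instance (nome1 : String) (nome2 : String) (out : Int) : Decidable (Spec_comparar_nomes_completos nome1 nome2 out) := by unfold Spec_comparar_nomes_completos; infer_instance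

-- ===== CLAIM (what is proved, stated in full; the proofs are below) =====
def Claim_equal_comparar_nomes_completos : Prop := ∀ (nome1 : String) (nome2 : String), Dom_comparar_nomes_completos nome1 nome2 → Spec_comparar_nomes_completos nome1 nome2 (comparar_nomes_completos nome1 nome2)

-- ===== LEMMAS AND PROOFS =====

-- reference splitter: words of cs split on ' ' (keeping empties), with pre prefixed to the first word
def pvSplitSp (pre : List Char) : List Char → List (List Char)
  | [] => [pre]
  | c :: t => if c = ' ' then pre :: pvSplitSp [] t else pvSplitSp (pre ++ [c]) t

theorem pvGo_eq (l : List Char) : ∀ (fuel : Nat) (cur : List Char) (acc : List (List Char)),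
    l.length ≤ fuel →
    PySem.Chars.splitOn.go [' '] fuel l cur acc = acc.reverse ++ pvSplitSp cur.reverse l := by
  induction l with
  | nil =>
    intro fuel cur acc _
    cases fuel <;> simp [PySem.Chars.splitOn.go, pvSplitSp]
  | cons c t ih =>
    intro fuel cur acc h
    cases fuel with
    | zero => simp at h
    | succ f =>
      by_cases hc : c = ' '
      · subst hc
        rw [show PySem.Chars.splitOn.go [' '] (f + 1) (' ' :: t) cur acc
              = PySem.Chars.splitOn.go [' '] f t [] (cur.reverse :: acc) from by
            simp [PySem.Chars.splitOn.go, List.isPrefixOf]]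
        rw [ih f [] (cur.reverse :: acc) (by simpa using h)]
        simp [pvSplitSp]
      · have hpre : [' '].isPrefixOf (c :: t) = false := by
          simp [List.isPrefixOf]; exact fun h' => hc h'.symm
        simp only [PySem.Chars.splitOn.go, hpre, Bool.false_eq_true, if_neg, not_false_iff]
        rw [ih f (c :: cur) acc (by simpa using Nat.le_of_succ_le_succ h)]
        simp [pvSplitSp, hc]

theorem pvSplitOn_eq (cs : List Char) : PySem.Chars.splitOn cs [' '] = pvSplitSp [] cs := by
  rw [PySem.Chars.splitOn.eq_def, pvGo_eq cs (cs.length + 1) [] [] (Nat.le_succ _)]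
  simp

theorem pvParse_fold (l : List Char) : ∀ (acc : List (List Char)) (w : List Char),
    ((l ++ [' ']).foldl pvParseStep (acc, w)).1
      = acc ++ (pvSplitSp w l).filter (fun p => !p.isEmpty) := by
  induction l with
  | nil =>
    intro acc w
    cases w <;> simp [pvParseStep, pvSplitSp]
  | cons c t ih =>
    intro acc w
    by_cases hc : c = ' '
    · subst hc
      have h1 : pvParseStep (acc, w) ' ' = (if w.length > 0 then acc ++ [w] else acc, []) := by
        simp [pvParseStep]
      cases w with
      | nil => simp only [List.cons_append, List.foldl_cons, h1]; rw [ih]; simp [pvSplitSp]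
      | cons a wt =>
        simp only [List.cons_append, List.foldl_cons, h1]
        rw [if_pos (by simp), ih]
        simp [pvSplitSp]
    · have h1 : pvParseStep (acc, w) c = (acc, w ++ [c]) := by simp [pvParseStep, hc]
      simp only [List.cons_append, List.foldl_cons, h1]
      rw [ih]
      simp [pvSplitSp, hc]

theorem pvParse_eq (cs : List Char) :
    pvParse cs = (PySem.Chars.splitOn cs [' ']).filter (fun p => !p.isEmpty) := by
  rw [pvParse, pvParse_fold, pvSplitOn_eq]; rfl

theorem pvCmp_eq (s t : List Char) :
    pvCmp s t = if s < t then -1 else if t < s then 1 else 0 := by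
  induction s generalizing t with
  | nil =>
    cases t with
    | nil => simp [pvCmp]
    | cons b t2 => simp [pvCmp, List.nil_lt_cons]
  | cons a s1 ih =>
    cases t with
    | nil => simp [pvCmp, List.nil_lt_cons, List.not_lt_nil]
    | cons b t2 =>
      have hab : a < b ↔ a.toNat < b.toNat := Iff.rfl
      rcases lt_trichotomy a b with h | h | h
      · have h1 : (a :: s1) < (b :: t2) := List.cons_lt_cons_iff.mpr (Or.inl h)
        have h2 : ¬ (b :: t2) < (a :: s1) := by
          rw [List.cons_lt_cons_iff]
          rintro (h' | ⟨h', _⟩)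
          · exact absurd h' (not_lt_of_gt h)
          · exact absurd h'.symm (ne_of_lt h)
        simp [pvCmp, hab.mp h, h1]
      · subst h
        have h2 : ¬ a.toNat < a.toNat := lt_irrefl _
        have h3 : (a :: s1) < (a :: t2) ↔ s1 < t2 := by
          rw [List.cons_lt_cons_iff]; simp
        have h4 : (a :: t2) < (a :: s1) ↔ t2 < s1 := by
          rw [List.cons_lt_cons_iff]; simp
        simp [pvCmp, h3, h4, ih t2]
      · have h1 : (b :: t2) < (a :: s1) := List.cons_lt_cons_iff.mpr (Or.inl h)
        have h2 : ¬ (a :: s1) < (b :: t2) := by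
          rw [List.cons_lt_cons_iff]
          rintro (h' | ⟨h', _⟩)
          · exact absurd h' (not_lt_of_gt h)
          · exact absurd h' (ne_of_gt h)
        have h5 : ¬ a.toNat < b.toNat := not_lt_of_gt h
        have h6 : b.toNat < a.toNat := h
        simp [pvCmp, h5, h6, h1, h2]

theorem pvComb (p1 a1 p2 a2 : List Char) :
    (if pvCmp p1 p2 ≠ 0 then pvCmp p1 p2 else pvCmp a1 a2)
      = (if pvTupLt (p2, a2) (p1, a1) then (1 : Int) else 0)
        - (if pvTupLt (p1, a1) (p2, a2) then (1 : Int) else 0) := by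
  rcases lt_trichotomy p1 p2 with h | h | h
  · have h2 : ¬ p2 < p1 := not_lt_of_gt h
    have h3 : p1 ≠ p2 := ne_of_lt h
    simp [pvCmp_eq, pvTupLt, h, h2, h3, Ne.symm h3]
  · subst h
    rcases lt_trichotomy a1 a2 with h' | h' | h'
    · simp [pvCmp_eq, pvTupLt, h', not_lt_of_gt h']
    · subst h'; simp [pvCmp_eq, pvTupLt]
    · simp [pvCmp_eq, pvTupLt, h', not_lt_of_gt h']
  · have h2 : ¬ p1 < p2 := not_lt_of_gt h
    have h3 : p2 ≠ p1 := ne_of_lt h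
    simp [pvCmp_eq, pvTupLt, h, h2, h3, Ne.symm h3]

-- ===== VERDICT (by name: the statement is the Claim_ definition above) =====
theorem comparar_nomes_completos_spec : Claim_equal_comparar_nomes_completos := by
  intro nome1 nome2 _
  unfold Spec_comparar_nomes_completos comparar_nomes_completos comparar_nomes_completos_alt pvChave
  simp only [pvParse_eq]
  exact pvComb _ _ _ _
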